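-- pv_equiv track=rewrite | github.com/spins-ai/turf-data-pipeline | feature_builders/draw_bias_builder.py | _distance_bucket
-- ===== SOURCE A (Python) =====
-- from typing import Any, Optional
--
-- _DIST_BREAKPOINTS = [1200, 1600, 2000, 2400]
--
-- def _distance_bucket(distance: Any) -> Optional[str]:
--     """Convert raw distance value to a coarse bucket string, or None."""
--     try:
--         d = int(distance)
--     except (TypeError, ValueError):
--         return None
--     if d <= 0:
--         return None
--     if d < _DIST_BREAKPOINTS[0]:
--         return "lt1200"
--     for i in range(1, len(_DIST_BREAKPOINTS)):
--         if d < _DIST_BREAKPOINTS[i]: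
--             lo = _DIST_BREAKPOINTS[i - 1]
--             hi = _DIST_BREAKPOINTS[i]
--             return f"{lo}-{hi}"
--     return "ge2400"
-- ===== SOURCE B (Python) =====
-- import bisect
--
-- _DIST_BREAKPOINTS = [1200, 1600, 2000, 2400]
-- _LABELS = ["lt1200", "1200-1600", "1600-2000", "2000-2400", "ge2400"]
--
-- def _distance_bucket(distance):
--     """Convert raw distance value to a coarse bucket string, or None."""
--     try:
--         d = int(distance)
--     except (TypeError, ValueError):
--         return None
--     if d <= 0:
--         return None
--     return _LABELS[bisect.bisect_right(_DIST_BREAKPOINTS, d)]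
-- ===== Notes on version B (the rewrite author's own statement) =====
-- stated objective: idiomatic
-- what changed: Replaces the explicit branch ladder and f-string label construction with a precomputed label table indexed by bisect.bisect_right over the breakpoint list.
import Mathlib
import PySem

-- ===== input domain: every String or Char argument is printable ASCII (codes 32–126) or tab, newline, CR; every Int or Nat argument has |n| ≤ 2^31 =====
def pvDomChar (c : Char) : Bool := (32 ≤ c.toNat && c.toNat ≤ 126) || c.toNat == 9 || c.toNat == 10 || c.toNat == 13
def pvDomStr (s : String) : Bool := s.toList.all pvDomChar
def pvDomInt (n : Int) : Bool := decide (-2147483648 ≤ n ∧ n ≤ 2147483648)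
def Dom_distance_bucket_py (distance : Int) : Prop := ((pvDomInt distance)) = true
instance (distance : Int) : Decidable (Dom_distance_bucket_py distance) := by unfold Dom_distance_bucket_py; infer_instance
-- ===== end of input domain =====

-- B replaces A's branch ladder and f-string formatting with a precomputed label table
-- indexed by bisect_right over the breakpoints (more idiomatic; return value only).

-- ===== PORT A =====
-- _DIST_BREAKPOINTS = [1200, 1600, 2000, 2400]
def pvBreakpointsA : List Int := [1200, 1600, 2000, 2400]

-- the for-loop over range(1, len(_DIST_BREAKPOINTS)) with early return:
-- first i with d < bp[i] yields "lo-hi", else falls through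
def distance_bucket_py (distance : Int) : Option String :=
  let d := distance  -- int(distance): identity on an int argument
  if d ≤ 0 then none
  else if d < pvBreakpointsA.getD 0 0 then some "lt1200"
  else
    match (PySem.List.pyRange 1 (pvBreakpointsA.length) 1).findSome? (fun i =>
        if d < PySem.List.pyGetD pvBreakpointsA i 0 then
          some (PySem.Int.toStr (PySem.List.pyGetD pvBreakpointsA (i - 1) 0) ++ "-" ++
                PySem.Int.toStr (PySem.List.pyGetD pvBreakpointsA i 0))
        else none) with
    | some s => some s
    | none => some "ge2400"

-- ===== PORT B =====
def pvBreakpointsB : List Int := [1200, 1600, 2000, 2400]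
def pvLabelsB : List String := ["lt1200", "1200-1600", "1600-2000", "2000-2400", "ge2400"]

-- bisect.bisect_right on the sorted breakpoint list = number of elements ≤ d
def pvBisectRight (xs : List Int) (d : Int) : Nat := xs.countP (fun b => decide (b ≤ d))

def distance_bucket_py_alt (distance : Int) : Option String :=
  let d := distance
  if d ≤ 0 then none
  else PySem.List.pyGet? pvLabelsB (pvBisectRight pvBreakpointsB d)

-- ===== PRECONDITION & SPEC =====
def Spec_distance_bucket_py (distance : Int) (out : Option String) : Prop := out = distance_bucket_py_alt distance
instance (distance : Int) (out : Option String) : Decidable (Spec_distance_bucket_py distance out) := by unfold Spec_distance_bucket_py; infer_instance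

-- ===== CLAIM (what is proved, stated in full; the proofs are below) =====
def Claim_equal_distance_bucket_py : Prop := ∀ (distance : Int), Dom_distance_bucket_py distance → Spec_distance_bucket_py distance (distance_bucket_py distance)

-- ===== LEMMAS AND PROOFS =====

-- ===== VERDICT (by name: the statement is the Claim_ definition above) =====
theorem distance_bucket_py_spec : Claim_equal_distance_bucket_py := by
  intro d _
  unfold Spec_distance_bucket_py distance_bucket_py distance_bucket_py_alt
  have hr : PySem.List.pyRange 1 (pvBreakpointsA.length) 1 = [1, 2, 3] := by decide
  rw [hr]
  have hs1 : PySem.Int.toStr 1200 ++ "-" ++ PySem.Int.toStr 1600 = "1200-1600" := by decide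
  have hs2 : PySem.Int.toStr 1600 ++ "-" ++ PySem.Int.toStr 2000 = "1600-2000" := by decide
  have hs3 : PySem.Int.toStr 2000 ++ "-" ++ PySem.Int.toStr 2400 = "2000-2400" := by decide
  simp only [pvBreakpointsA, pvBreakpointsB, pvLabelsB, pvBisectRight, List.findSome?,
    List.countP, List.countP.go, List.getD, PySem.List.pyGetD]
  by_cases h0 : d ≤ 0
  · simp [h0]
  by_cases h1 : d < 1200
  · have b1 : decide ((1200:Int) ≤ d) = false := by simp; omega
    have b2 : decide ((1600:Int) ≤ d) = false := by simp; omega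
    have b3 : decide ((2000:Int) ≤ d) = false := by simp; omega
    have b4 : decide ((2400:Int) ≤ d) = false := by simp; omega
    simp [h0, h1, b1, b2, b3, b4]
  by_cases h2 : d < 1600
  · have a1 : (1200:Int) ≤ d := by omega
    have b2 : decide ((1600:Int) ≤ d) = false := by simp; omega
    have b3 : decide ((2000:Int) ≤ d) = false := by simp; omega
    have b4 : decide ((2400:Int) ≤ d) = false := by simp; omega
    simp [h0, h1, h2, a1, b2, b3, b4, hs1]
  by_cases h3 : d < 2000
  · have a1 : (1200:Int) ≤ d := by omega
    have a2 : (1600:Int) ≤ d := by omega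
    have b3 : decide ((2000:Int) ≤ d) = false := by simp; omega
    have b4 : decide ((2400:Int) ≤ d) = false := by simp; omega
    simp [h0, h1, h2, h3, a1, a2, b3, b4, hs2]
  by_cases h4 : d < 2400
  · have a1 : (1200:Int) ≤ d := by omega
    have a2 : (1600:Int) ≤ d := by omega
    have a3 : (2000:Int) ≤ d := by omega
    have b4 : decide ((2400:Int) ≤ d) = false := by simp; omega
    simp [h0, h1, h2, h3, h4, a1, a2, a3, b4, hs3]
  · have a1 : (1200:Int) ≤ d := by omega
    have a2 : (1600:Int) ≤ d := by omega
    have a3 : (2000:Int) ≤ d := by omega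
    have a4 : (2400:Int) ≤ d := by omega
    simp [h0, h1, h2, h3, h4, a1, a2, a3, a4]
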